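-- pv_equiv track=rewrite | github.com/daviddoret/punctilious | sandbox/test8.py | sequence_length_at_index
-- ===== SOURCE A (Python) =====
-- def sequence_length_at_index(index: int) -> int:
--     """
--     Return the length of the `index`-th finite sequence (0-based)
--     when all finite sequences of nonnegative integers are ordered by:
--       1) total weight = (sum of entries + length),
--       2) length,
--       3) lexicographic order.
--
--     The empty sequence is at index 0 and has length 0.
--     """
--
--     if index == 0:
--         return 0
--
--     # 1) Determine the weight layer this index falls into.
--     # For n >= 1, indices [2^(weight-1), 2^weight - 1] all share the same weight.
--     weight = index.bit_length()  # weight = floor(log2(index)) + 1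
--     choose_param = weight - 1  # We'll use m = weight - 1 in binomial coefficients C(m, k)
--
--     # 2) Position inside the weight layer (0-based)
--     start_of_layer = 1 << (weight - 1)  # 2^(weight-1)
--     offset_in_layer = index - start_of_layer
--
--     # 3) Within a fixed weight layer, lengths appear in runs:
--     #    length = 1 repeated C(m,0) times, length = 2 repeated C(m,1) times, ..., up to length = weight repeated C(m,m) times.
--     #    We walk these runs until the cumulative count exceeds offset_in_layer.
--     cumulative_count = 0
--     combinations_in_run = 1  # C(m, 0) = 1
--
--     for length in range(1, weight + 1):
--         cumulative_count += combinations_in_run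
--         if offset_in_layer < cumulative_count:
--             return length
--         # Update C(m, k) -> C(m, k+1) without recomputing from scratch
--         combinations_in_run = combinations_in_run * (choose_param - (length - 1)) // length
--
--     # Should never happen
--     raise RuntimeError("Index could not be placed in any length run")
-- ===== SOURCE B (Python) =====
-- def sequence_length_at_index(index: int) -> int:
--     # Factorial-table binomials + prefix sums + hand-written binary search,
--     # instead of A's incremental-binomial early-exit linear scan.
--     if index == 0:
--         return 0
--     weight = index.bit_length()
--     m = weight - 1
--     offset = index - (1 << m)
--     # factorials 0! .. m!
--     fact = [1]
--     for i in range(1, m + 1):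
--         fact.append(fact[-1] * i)
--     # prefix[j] = C(m,0) + ... + C(m,j), binomials from the factorial table
--     prefix = []
--     total = 0
--     for k in range(m + 1):
--         total += fact[m] // (fact[k] * fact[m - k])
--         prefix.append(total)
--     # binary search for the first j with offset < prefix[j]
--     lo, hi = 0, m
--     while lo < hi:
--         mid = (lo + hi) // 2
--         if prefix[mid] <= offset:
--             lo = mid + 1
--         else:
--             hi = mid
--     return lo + 1
-- ===== Notes on version B (the rewrite author's own statement) =====
-- stated objective: alternative
-- what changed: B computes the binomial row from a precomputed factorial table (m!//(k!*(m-k)!)) instead of A's incremental C(m,k)->C(m,k+1) products, builds the prefix-sum table, and locates the offset with a hand-written binary search instead of A's early-exit linear scan over the runs.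
import Mathlib
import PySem

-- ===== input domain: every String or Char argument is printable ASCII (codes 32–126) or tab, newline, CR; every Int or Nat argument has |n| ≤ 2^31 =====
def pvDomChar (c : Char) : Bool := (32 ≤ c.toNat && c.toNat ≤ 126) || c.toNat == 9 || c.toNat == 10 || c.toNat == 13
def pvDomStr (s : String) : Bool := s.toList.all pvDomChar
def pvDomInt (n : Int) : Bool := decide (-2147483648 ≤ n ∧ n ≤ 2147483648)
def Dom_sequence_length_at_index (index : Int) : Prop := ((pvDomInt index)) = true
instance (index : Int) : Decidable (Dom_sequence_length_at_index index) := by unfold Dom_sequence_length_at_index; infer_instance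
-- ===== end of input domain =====

-- B replaces A's incremental-binomial early-exit scan by a factorial-table binomial row,
-- its prefix sums, and a hand-written binary search (objective: alternative).

-- ===== PORT A =====
-- the `for length in range(1, weight+1)` loop with early `return length`;
-- the `[]` case is Python's unreachable `raise RuntimeError` (proved unreachable inside the claim)
def pvALoop (offset choose_param : Int) : List Int → Int → Int → Int
  | [], _, _ => 0
  | length :: rest, cumulative, comb =>
      let cumulative' := cumulative + comb
      if offset < cumulative' then length
      else pvALoop offset choose_param rest cumulative'
             (PySem.Int.floordiv (comb * (choose_param - (length - 1))) length)

def sequence_length_at_index (index : Int) : Int :=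
  if index = 0 then 0
  else
    let weight : Int := (PySem.Int.bitLength index : Int)
    let choose_param : Int := weight - 1
    let start_of_layer : Int := (1 : Int) <<< (weight - 1).toNat
    let offset_in_layer : Int := index - start_of_layer
    pvALoop offset_in_layer choose_param (PySem.List.pyRange 1 (weight + 1)) 0 1

-- ===== PORT B =====
-- the `while lo < hi` binary search of Source B; list indexing is pyGetD (always in range here)
def pvBS (pref : List Int) (off lo hi : Int) : Int :=
  if h : lo < hi then
    let mid := PySem.Int.floordiv (lo + hi) 2
    if PySem.List.pyGetD pref mid 0 ≤ off then pvBS pref off (mid + 1) hi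
    else pvBS pref off lo mid
  else lo
termination_by (hi - lo).toNat
decreasing_by
  · have hb := PySem.Int.floordiv_two_mid_bounds (le_of_lt h)
    omega
  · have hb := PySem.Int.floordiv_two_mid_bounds (le_of_lt h)
    have hlt : PySem.Int.floordiv (lo + hi) 2 < hi := by
      rw [PySem.Int.floordiv_lt_iff_lt_mul (by omega)]
      omega
    omega

def sequence_length_at_index_alt (index : Int) : Int :=
  if index = 0 then 0
  else
    let weight : Int := (PySem.Int.bitLength index : Int)
    let m : Int := weight - 1
    let offset : Int := index - ((1 : Int) <<< m.toNat)
    -- fact[-1] on the always-nonempty accumulator is its last element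
    let fact : List Int :=
      (PySem.List.pyRange 1 (m + 1)).foldl (fun fs i => fs ++ [fs.getLast! * i]) [1]
    let pref : List Int :=
      ((PySem.List.pyRange 0 (m + 1)).foldl
        (fun (st : List Int × Int) k =>
          let t := st.2 + PySem.Int.floordiv (PySem.List.pyGetD fact m 0)
                     (PySem.List.pyGetD fact k 0 * PySem.List.pyGetD fact (m - k) 0)
          (st.1 ++ [t], t)) ([], 0)).1
    pvBS pref offset 0 m + 1

-- ===== PRECONDITION & SPEC =====
def Spec_sequence_length_at_index (index : Int) (out : Int) : Prop := out = sequence_length_at_index_alt index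
instance (index : Int) (out : Int) : Decidable (Spec_sequence_length_at_index index out) := by unfold Spec_sequence_length_at_index; infer_instance

-- ===== CLAIM (what is proved, stated in full; the proofs are below) =====
def Claim_equal_sequence_length_at_index : Prop := ∀ (index : Int), Dom_sequence_length_at_index index → Spec_sequence_length_at_index index (sequence_length_at_index index)

-- ===== LEMMAS AND PROOFS =====

-- partial sums of the binomial row C(m, 0..j-1), as Int
def pvQ (m j : Nat) : Nat := ∑ i ∈ Finset.range j, m.choose i

def pvQI (m j : Nat) : Int := ((pvQ m j : Nat) : Int)

lemma pvQ_mono (m : Nat) {j k : Nat} (h : j ≤ k) : pvQ m j ≤ pvQ m k := by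
  unfold pvQ
  apply Finset.sum_le_sum_of_subset
  intro x hx
  simp only [Finset.mem_range] at hx ⊢
  omega

lemma pvQI_mono (m : Nat) {j k : Nat} (h : j ≤ k) : pvQI m j ≤ pvQI m k := by
  unfold pvQI; exact_mod_cast pvQ_mono m h

lemma pvQ_succ (m j : Nat) : pvQ m (j + 1) = pvQ m j + m.choose j := by
  simp [pvQ, Finset.sum_range_succ]

lemma pvQ_top (m : Nat) : pvQ m (m + 1) = 2 ^ m := by
  simp [pvQ, Nat.sum_range_choose]

-- the exact-division binomial update in A's loop
lemma pv_choose_step (m k : Nat) (h : k < m) :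
    PySem.Int.floordiv ((m.choose k : Int) * ((m : Int) - k)) ((k : Int) + 1)
      = (m.choose (k + 1) : Int) := by
  have h1 : ((m : Int) - k) = ((m - k : Nat) : Int) := by
    have := Nat.le_of_lt h; push_cast [this]; ring
  rw [h1]
  have h2 : ((m.choose k : Int) * ((m - k : Nat) : Int)) = ((m.choose k * (m - k) : Nat) : Int) := by
    push_cast; ring
  have h3 : ((k : Int) + 1) = ((k + 1 : Nat) : Int) := by push_cast; ring
  rw [h2, h3, PySem.Int.floordiv_natCast]
  have h4 : m.choose k * (m - k) = m.choose (k + 1) * (k + 1) := (Nat.choose_succ_right_eq m k).symm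
  rw [h4, Nat.mul_div_cancel _ (Nat.succ_pos k)]

-- A's loop invariant: entering the iteration with length = j+1, cumulative = pvQ m j, comb = C(m,j)
lemma pvALoop_eq (offset : Int) (m : Nat) (hoff : offset < ((2 ^ m : Nat) : Int)) :
    ∀ d j, j + d = m + 1 → (j = 0 ∨ pvQI m j ≤ offset) →
      pvALoop offset (m : Int) (PySem.List.pyRange ((j : Int) + 1) ((m : Int) + 2))
          (pvQI m j) ((m.choose j : Nat) : Int)
        = (j : Int) + 1 +
          (((List.range' j d).countP (fun k => pvQI m (k + 1) ≤ offset) : Nat) : Int) := by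
  intro d
  induction d with
  | zero =>
      intro j hjd hj
      exfalso
      have hj' : j = m + 1 := by omega
      rcases hj with h0 | hle
      · omega
      · rw [hj'] at hle; unfold pvQI at hle; rw [pvQ_top] at hle; omega
  | succ d ih =>
      intro j hjd hj
      have hjm : j ≤ m := by omega
      have hlt : ((j : Int) + 1) < ((m : Int) + 2) := by
        have : (j : Int) ≤ (m : Int) := by exact_mod_cast hjm
        omega
      rw [PySem.List.pyRange_one_cons hlt]
      simp only [pvALoop]
      have hcum : pvQI m j + ((m.choose j : Nat) : Int) = pvQI m (j + 1) := by
        unfold pvQI; rw [pvQ_succ]; push_cast; ring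
      rw [hcum]
      by_cases hbr : offset < pvQI m (j + 1)
      · rw [if_pos hbr]
        have hcount : (List.range' j (d + 1)).countP
            (fun k => pvQI m (k + 1) ≤ offset) = 0 := by
          rw [List.countP_eq_zero]
          intro k hk
          have hk' : j ≤ k := (List.mem_range'_1.mp hk).1
          have hmono : pvQI m (j + 1) ≤ pvQI m (k + 1) := pvQI_mono m (by omega)
          simp only [decide_eq_true_eq]
          omega
        rw [hcount]
        simp
      · rw [if_neg hbr]
        rw [not_lt] at hbr
        by_cases hjem : j = m
        · exfalso
          rw [hjem] at hbr; unfold pvQI at hbr; rw [pvQ_top] at hbr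
          omega
        · have hjltm : j < m := lt_of_le_of_ne hjm hjem
          have hupd : PySem.Int.floordiv (((m.choose j : Nat) : Int) * ((m : Int) - (((j : Int) + 1) - 1))) ((j : Int) + 1)
              = ((m.choose (j + 1) : Nat) : Int) := by
            have : ((m : Int) - (((j : Int) + 1) - 1)) = ((m : Int) - (j : Int)) := by ring
            rw [this]
            exact pv_choose_step m j hjltm
          rw [hupd]
          have hcast : ((j : Int) + 1) = (((j + 1 : Nat) : Int)) := by push_cast; ring
          rw [hcast]
          rw [ih (j + 1) (by omega) (Or.inr hbr)]
          have hhead : (List.range' j (d + 1)).countP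
              (fun k => pvQI m (k + 1) ≤ offset)
              = 1 + (List.range' (j + 1) d).countP (fun k => pvQI m (k + 1) ≤ offset) := by
            rw [List.range'_succ, List.countP_cons]
            simp only [decide_eq_true_eq]
            rw [if_pos hbr]
            omega
          rw [hhead]
          push_cast
          ring

-- B's factorial table is the row 0!, 1!, ..., m!
lemma pv_fact_eq (m : Nat) :
    ∀ j, j ≤ m →
      (PySem.List.pyRange 1 ((j : Int) + 1)).foldl (fun fs i => fs ++ [fs.getLast! * i]) [1]
        = (List.range (j + 1)).map (fun k => ((Nat.factorial k : Nat) : Int)) := by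
  intro j
  induction j with
  | zero => intro _; simp [Nat.factorial]
  | succ j ih =>
      intro hj
      have hc2 : ((j + 1 : Nat) : Int) = (j : Int) + 1 := by push_cast; ring
      rw [PySem.List.pyRange_one_succ_right (by omega), List.foldl_append, hc2, ih (by omega)]
      simp only [List.foldl_cons, List.foldl_nil]
      have hlast : ((List.range (j + 1)).map (fun k => ((Nat.factorial k : Nat) : Int))).getLast!
          = ((Nat.factorial j : Nat) : Int) := by
        rw [List.range_succ]
        simp
      rw [hlast]
      have hmul : ((Nat.factorial j : Nat) : Int) * ((j : Int) + 1) = ((Nat.factorial (j + 1) : Nat) : Int) := by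
        rw [Nat.factorial_succ]; push_cast; ring
      rw [hmul, List.range_succ, List.range_succ, List.map_append, List.map_append]
      simp [List.range_succ]

-- the factorial-quotient summand is the binomial coefficient
lemma pv_fact_div (m k : Nat) (hk : k ≤ m) :
    PySem.Int.floordiv ((Nat.factorial m : Nat) : Int)
        (((Nat.factorial k : Nat) : Int) * ((Nat.factorial (m - k) : Nat) : Int))
      = ((m.choose k : Nat) : Int) := by
  have h1 : ((Nat.factorial k : Nat) : Int) * ((Nat.factorial (m - k) : Nat) : Int)
      = ((Nat.factorial k * Nat.factorial (m - k) : Nat) : Int) := by push_cast; ring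
  rw [h1, PySem.Int.floordiv_natCast]
  rw [← Nat.choose_eq_factorial_div_factorial hk]

-- B's prefix-sum fold over the factorial-quotient binomial row
lemma pv_prefix_eq (m : Nat)
    (fact : List Int)
    (hfact : fact = (List.range (m + 1)).map (fun k => ((Nat.factorial k : Nat) : Int))) :
    ∀ j, j ≤ m + 1 →
      (((List.range j).map (fun (k : Nat) => (k : Int))).foldl
        (fun (st : List Int × Int) k =>
          let t := st.2 + PySem.Int.floordiv (PySem.List.pyGetD fact (m : Int) 0)
                     (PySem.List.pyGetD fact k 0 * PySem.List.pyGetD fact ((m : Int) - k) 0)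
          (st.1 ++ [t], t)) ([], 0))
      = ((List.range j).map (fun k => pvQI m (k + 1)), pvQI m j) := by
  have hget : ∀ i : Nat, i ≤ m → PySem.List.pyGetD fact (i : Int) 0 = ((Nat.factorial i : Nat) : Int) := by
    intro i hi
    rw [hfact, PySem.List.pyGetD_natCast]
    rw [List.getD_eq_getElem?_getD, List.getElem?_map]
    have : i < m + 1 := by omega
    simp [List.getElem?_range this]
  intro j
  induction j with
  | zero => intro _; simp [pvQI, pvQ]
  | succ j ih =>
      intro hj
      have hsplit : (List.range (j + 1)).map (fun (k : Nat) => (k : Int))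
          = (List.range j).map (fun (k : Nat) => (k : Int)) ++ [((j : Nat) : Int)] := by
        simp [List.range_succ]
      rw [hsplit, List.foldl_append, ih (by omega)]
      simp only [List.foldl_cons, List.foldl_nil]
      have hjm : j ≤ m := by omega
      have hsub : ((m : Int) - (j : Int)) = ((m - j : Nat) : Int) := by push_cast [hjm]; ring
      rw [hsub, hget m (le_refl m), hget j hjm, hget (m - j) (by omega)]
      rw [pv_fact_div m j hjm]
      have h1 : pvQI m j + ((m.choose j : Nat) : Int) = pvQI m (j + 1) := by
        unfold pvQI; rw [pvQ_succ]; push_cast; ring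
      rw [h1]
      have hsplit2 : (List.range (j + 1)).map (fun k => pvQI m (k + 1))
          = (List.range j).map (fun k => pvQI m (k + 1)) ++ [pvQI m (j + 1)] := by
        simp [List.range_succ]
      rw [hsplit2]

-- B's binary search returns an index r with: everything below r inside the table is ≤ off, row r is > off
lemma pvBS_eq (m : Nat) (off : Int)
    (pref : List Int) (hpref : pref = (List.range (m + 1)).map (fun k => pvQI m (k + 1))) :
    ∀ fuel (lo hi : Int), (hi - lo).toNat ≤ fuel → 0 ≤ lo → lo ≤ hi → hi ≤ (m : Int) →
      (∀ j : Nat, (j : Int) < lo → pvQI m (j + 1) ≤ off) →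
      (∀ j : Nat, hi ≤ (j : Int) → j ≤ m → off < pvQI m (j + 1)) →
      ∃ r : Nat, pvBS pref off lo hi = (r : Int) ∧ r ≤ m ∧
        (∀ j : Nat, j < r → pvQI m (j + 1) ≤ off) ∧
        (∀ j : Nat, r ≤ j → j ≤ m → off < pvQI m (j + 1)) := by
  have hgetN : ∀ n : Nat, n ≤ m → PySem.List.pyGetD pref (n : Int) 0 = pvQI m (n + 1) := by
    intro n hn
    rw [hpref, PySem.List.pyGetD_natCast]
    rw [List.getD_eq_getElem?_getD, List.getElem?_map]
    have h2 : n < m + 1 := by omega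
    simp [List.getElem?_range h2]
  have hget : ∀ i : Int, 0 ≤ i → i ≤ (m : Int) → PySem.List.pyGetD pref i 0 = pvQI m (i.toNat + 1) := by
    intro i h0 hm
    have h1 : i = ((i.toNat : Nat) : Int) := by omega
    conv_lhs => rw [h1]
    exact hgetN i.toNat (by omega)
  intro fuel
  induction fuel with
  | zero =>
      intro lo hi hf h0 hlh hhm Hlo Hhi
      have hlh' : lo = hi := by omega
      rw [pvBS, dif_neg (by omega)]
      refine ⟨lo.toNat, by omega, by omega, ?_, ?_⟩
      · intro j hj; exact Hlo j (by omega)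
      · intro j hj hjm; exact Hhi j (by omega) hjm
  | succ fuel ih =>
      intro lo hi hf h0 hlh hhm Hlo Hhi
      by_cases h : lo < hi
      · rw [pvBS, dif_pos h]
        have hb := PySem.Int.floordiv_two_mid_bounds (le_of_lt h)
        have hmidlt : PySem.Int.floordiv (lo + hi) 2 < hi := by
          rw [PySem.Int.floordiv_lt_iff_lt_mul (by omega)]
          omega
        set mid := PySem.Int.floordiv (lo + hi) 2 with hmid
        have hg := hget mid (by omega) (by omega)
        by_cases hc : PySem.List.pyGetD pref mid 0 ≤ off
        · rw [if_pos hc]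
          rw [hg] at hc
          apply ih (mid + 1) hi (by omega) (by omega) (by omega) hhm
          · intro j hj
            have hjm : j ≤ mid.toNat := by omega
            exact le_trans (pvQI_mono m (by omega)) hc
          · exact Hhi
        · rw [if_neg hc]
          rw [hg] at hc
          rw [not_le] at hc
          apply ih lo mid (by omega) h0 (by omega) (by omega) Hlo
          · intro j hj hjm
            exact lt_of_lt_of_le hc (pvQI_mono m (by omega))
      · rw [pvBS, dif_neg h]
        have hlh' : lo = hi := by omega
        refine ⟨lo.toNat, by omega, by omega, ?_, ?_⟩
        · intro j hj; exact Hlo j (by omega)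
        · intro j hj hjm; exact Hhi j (by omega) hjm

-- a run-boundary count against a threshold r that splits the monotone row is exactly r
lemma pv_count_eq (m r : Nat) (off : Int) (hr : r ≤ m)
    (h1 : ∀ j : Nat, j < r → pvQI m (j + 1) ≤ off)
    (h2 : ∀ j : Nat, r ≤ j → j ≤ m → off < pvQI m (j + 1)) :
    (List.range' 0 (m + 1)).countP (fun k => pvQI m (k + 1) ≤ off) = r := by
  rw [← List.range_eq_range']
  have hcong : (List.range (m + 1)).countP (fun k => pvQI m (k + 1) ≤ off)
      = (List.range (m + 1)).countP (fun k => k < r) := by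
    apply List.countP_congr
    intro k hk
    have hkm : k < m + 1 := List.mem_range.mp hk
    simp only [decide_eq_true_eq]
    constructor
    · intro hle
      by_contra hge
      exact absurd hle (not_le.mpr (h2 k (by omega) (by omega)))
    · intro hlt
      exact h1 k hlt
  rw [hcong]
  have : ∀ n r : Nat, r ≤ n → (List.range n).countP (fun k => k < r) = r := by
    intro n
    induction n with
    | zero => intro r hr0; simp; omega
    | succ n ihn =>
        intro r hr0
        rw [List.range_succ, List.countP_append]
        by_cases hrn : r ≤ n
        · rw [ihn r hrn]
          simp [Nat.not_lt.mpr hrn]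
        · have hre : r = n + 1 := by omega
          rw [hre]
          have : (List.range n).countP (fun k => k < n + 1) = (List.range n).countP (fun k => k < n) := by
            apply List.countP_congr
            intro k hk
            have := List.mem_range.mp hk
            simp only [decide_eq_true_eq]
            omega
          rw [this, ihn n (le_refl n)]
          simp
  exact this (m + 1) r (by omega)

-- ===== VERDICT (by name: the statement is the Claim_ definition above) =====
theorem sequence_length_at_index_spec : Claim_equal_sequence_length_at_index := by
  intro index _
  unfold Spec_sequence_length_at_index
  unfold sequence_length_at_index sequence_length_at_index_alt
  by_cases h0 : index = 0
  · simp [h0]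
  · rw [if_neg h0, if_neg h0]
    set w : Nat := PySem.Int.bitLength index with hw
    have hw1 : 1 ≤ w := by
      by_contra hc
      have hwz : w = 0 := by omega
      have := PySem.Int.lt_two_pow_bitLength index
      rw [← hw, hwz] at this
      simp at this
      exact h0 (by omega)
    obtain ⟨m, hm⟩ : ∃ m, w = m + 1 := ⟨w - 1, by omega⟩
    have hwm : ((w : Int) - 1) = (m : Int) := by rw [hm]; push_cast; ring
    have hwmt : ((w : Int) - 1).toNat = m := by rw [hwm]; simp
    have hpow : ((1 : Int) <<< m) = ((2 ^ m : Nat) : Int) := by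
      simp [Int.shiftLeft_eq]
    have hoff : index - ((2 ^ m : Nat) : Int) < ((2 ^ m : Nat) : Int) := by
      have h1 : index.natAbs < 2 ^ w := PySem.Int.lt_two_pow_bitLength index
      have h2 : index ≤ (index.natAbs : Int) := Int.le_natAbs
      have h3 : ((index.natAbs : Int)) < ((2 ^ w : Nat) : Int) := by exact_mod_cast h1
      have h4 : ((2 ^ w : Nat) : Int) = ((2 ^ m : Nat) : Int) * 2 := by
        rw [hm]; push_cast; ring
      omega
    have hw2 : (w : Int) + 1 = (m : Int) + 2 := by rw [hm]; push_cast; ring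
    dsimp only
    rw [hwmt, hwm, hpow, hw2]
    set off : Int := index - ((2 ^ m : Nat) : Int) with hoffdef
    -- A side: instantiate the loop invariant at j = 0
    have hA := pvALoop_eq off m hoff (m + 1) 0 (by omega) (Or.inl rfl)
    have e1 : pvQI m 0 = 0 := by simp [pvQI, pvQ]
    have e2 : ((m.choose 0 : Nat) : Int) = 1 := by simp
    have e3 : (((0 : Nat) : Int) + 1) = 1 := by norm_num
    rw [e1, e2, e3] at hA
    rw [hA]
    -- B side: the factorial table, the prefix fold, then the binary search
    rw [pv_fact_eq m m (le_refl m)]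
    have hc1 : ((m : Int) + 1) = ((m + 1 : Nat) : Int) := by push_cast; ring
    rw [hc1, PySem.List.pyRange_zero_natCast]
    have hP := pv_prefix_eq m _ rfl (m + 1) (le_refl (m + 1))
    rw [hP]
    have hfst : (((List.range (m + 1)).map (fun k => pvQI m (k + 1)), pvQI m (m + 1))).1
        = (List.range (m + 1)).map (fun k => pvQI m (k + 1)) := rfl
    rw [hfst]
    -- the binary search
    have hBS := pvBS_eq m off _ rfl ((((m : Int)) - 0).toNat) 0 (m : Int) (le_refl _)
      (le_refl 0) (by omega) (le_refl _)
      (by intro j hj; omega)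
      (by intro j hj hjm
          have hjem : j = m := by omega
          rw [hjem]
          unfold pvQI; rw [pvQ_top]; omega)
    obtain ⟨r, hrval, hrm, hr1, hr2⟩ := hBS
    rw [hrval]
    rw [pv_count_eq m r off hrm hr1 hr2]
    ring
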